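-- pv_equiv track=rewrite | github.com/gangslee/Coding-Test | 기타/210418 베어로보틱스/string.py | stringToNum
-- ===== SOURCE A (Python) =====
-- numbers = ["zero", "one", "two", "three", "four",
--            "five", "six", "seven", "eight", "nine"]
--
-- signs = ["plus", "minus"]
--
-- def stringToNum(strParam):
--     result, current = "", ""
--
--     for sp in strParam:
--         current += sp
--
--         if current in numbers:
--             result += (str(numbers.index(current)))
--             current = ""
--         elif current in signs:
--             if current == "plus":
--                 result += ' + '
--             else:
--                 result += ' - '
--             current = ""
--
--     return result
-- ===== SOURCE B (Python) =====
-- WORDS = {"zero": "0", "one": "1", "two": "2", "three": "3", "four": "4",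
--          "five": "5", "six": "6", "seven": "7", "eight": "8", "nine": "9",
--          "plus": " + ", "minus": " - "}
--
-- def stringToNum(strParam):
--     out = []
--     i, n = 0, len(strParam)
--     while i < n:
--         for w, rep in WORDS.items():
--             if strParam.startswith(w, i):
--                 out.append(rep)
--                 i += len(w)
--                 break
--         else:
--             break
--     return "".join(out)
-- ===== Notes on version B (the rewrite author's own statement) =====
-- stated objective: idiomatic
-- what changed: Replaces A's char-by-char buffer accumulation with membership tests against two word lists by a single word→output table scanned whole-keyword-at-a-time with an index, breaking at the first position where no keyword matches (where A silently goes quiet).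
import Mathlib
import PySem

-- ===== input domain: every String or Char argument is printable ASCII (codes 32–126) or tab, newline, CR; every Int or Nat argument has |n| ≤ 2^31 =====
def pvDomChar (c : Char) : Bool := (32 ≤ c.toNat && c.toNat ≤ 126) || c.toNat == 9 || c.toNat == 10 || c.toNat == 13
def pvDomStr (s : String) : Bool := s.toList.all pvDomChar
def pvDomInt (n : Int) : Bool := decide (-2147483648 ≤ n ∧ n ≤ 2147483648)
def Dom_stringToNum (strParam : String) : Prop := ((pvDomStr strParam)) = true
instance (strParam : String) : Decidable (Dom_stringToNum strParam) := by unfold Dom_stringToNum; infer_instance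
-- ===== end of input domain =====

-- B replaces A's char-by-char buffer accumulation with a word-table scan that matches
-- a whole keyword at each position and breaks on the first non-match (idiomatic rewrite).

-- ===== PORT A =====
-- the module-level lists `numbers` and `signs`, as lists of char lists
def numbersA : List (List Char) :=
  ["zero".toList, "one".toList, "two".toList, "three".toList, "four".toList,
   "five".toList, "six".toList, "seven".toList, "eight".toList, "nine".toList]

def signsA : List (List Char) := ["plus".toList, "minus".toList]

-- A's loop body on state (result, current); membership is checked before
-- `numbers.index(current)`, so the `.getD 0` default of index? is never used
def stepA (st : List Char × List Char) (sp : Char) : List Char × List Char :=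
  if st.2 ++ [sp] ∈ numbersA then
    (st.1 ++ (PySem.Int.toStr ((PySem.List.index? numbersA (st.2 ++ [sp])).getD 0)).toList, [])
  else if st.2 ++ [sp] ∈ signsA then
    if st.2 ++ [sp] = "plus".toList then (st.1 ++ " + ".toList, [])
    else (st.1 ++ " - ".toList, [])
  else (st.1, st.2 ++ [sp])

def stringToNum (strParam : String) : String :=
  String.ofList (strParam.toList.foldl stepA ([], [])).1

-- ===== PORT B =====
-- Source B's WORDS dict, in insertion order: word ↦ replacement
def tableB : List (List Char × List Char) :=
  [("zero".toList, "0".toList), ("one".toList, "1".toList), ("two".toList, "2".toList),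
   ("three".toList, "3".toList), ("four".toList, "4".toList), ("five".toList, "5".toList),
   ("six".toList, "6".toList), ("seven".toList, "7".toList), ("eight".toList, "8".toList),
   ("nine".toList, "9".toList), ("plus".toList, " + ".toList), ("minus".toList, " - ".toList)]

-- the entries of tableB all have nonempty keys (used for termination of scanB)
theorem tableB_key_pos : ∀ p ∈ tableB, 0 < p.1.length := by decide

-- Source B's while loop: the index i is modelled by recursing on the suffix strParam[i:];
-- `startswith(w, i)` is `isPrefixOf` on that suffix, the first matching dict entry is find?
def scanB (cs : List Char) : List Char :=
  match h : tableB.find? (fun p => p.1.isPrefixOf cs) with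
  | some (w, r) => r ++ scanB (cs.drop w.length)
  | none => []
termination_by cs.length
decreasing_by
  have hmem := List.mem_of_find?_eq_some h
  have hp : w <+: cs := by
    have hpred := List.find?_some h
    simpa [List.isPrefixOf_iff_prefix] using hpred
  have hw : 0 < w.length := tableB_key_pos (w, r) hmem
  have hlen := hp.length_le
  simp only [List.length_drop]
  omega

def stringToNum_alt (strParam : String) : String :=
  String.ofList (scanB strParam.toList)

-- ===== PRECONDITION & SPEC =====
def Spec_stringToNum (strParam : String) (out : String) : Prop := out = stringToNum_alt strParam
instance (strParam : String) (out : String) : Decidable (Spec_stringToNum strParam out) := by unfold Spec_stringToNum; infer_instance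

-- ===== CLAIM (what is proved, stated in full; the proofs are below) =====
def Claim_equal_stringToNum : Prop := ∀ (strParam : String), Dom_stringToNum strParam → Spec_stringToNum strParam (stringToNum strParam)

-- ===== LEMMAS AND PROOFS =====

-- A's result component only accumulates: the loop from (res, cur) is the loop from ([], cur)
-- with res prepended to the result
theorem stepA_shift (res cur : List Char) (c : Char) :
    stepA (res, cur) c = (res ++ (stepA ([], cur) c).1, (stepA ([], cur) c).2) := by
  unfold stepA
  split_ifs <;> simp

theorem foldl_stepA_shift (cs : List Char) (res cur : List Char) :
    cs.foldl stepA (res, cur) =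
      (res ++ (cs.foldl stepA ([], cur)).1, (cs.foldl stepA ([], cur)).2) := by
  induction cs generalizing res cur with
  | nil => simp
  | cons c cs ih =>
    simp only [List.foldl_cons, stepA_shift res cur c]
    rw [ih]
    have h2 := ih (stepA ([], cur) c).1 (stepA ([], cur) c).2
    rw [Prod.mk.eta] at h2
    rw [h2]
    simp

-- every word A tests for is a key of tableB
theorem words_in_tableB (w : List Char) (hw : w ∈ numbersA ∨ w ∈ signsA) :
    w ∈ tableB.map Prod.fst := by
  simp only [numbersA, signsA, List.mem_cons, List.not_mem_nil, or_false] at hw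
  rcases hw with (h | h | h | h | h | h | h | h | h | h) | (h | h) <;> subst h <;> decide

-- consuming exactly one keyword from an empty buffer emits its replacement and resets
theorem word_eval : ∀ p ∈ tableB, p.1.foldl stepA ([], []) = (p.2, []) := by decide

-- if no keyword is a prefix of cs, A's loop from an empty buffer emits nothing:
-- the buffer just grows to cs
theorem noMatch (cs : List Char) (h : ∀ w ∈ tableB.map Prod.fst, ¬ w <+: cs)
    (res : List Char) : cs.foldl stepA (res, []) = (res, cs) := by
  induction cs using List.reverseRecOn with
  | nil => simp
  | append_singleton ys c ih =>
    have hys : ∀ w ∈ tableB.map Prod.fst, ¬ w <+: ys := by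
      intro w hw hpre
      exact h w hw (hpre.trans (List.prefix_append ys [c]))
    rw [List.foldl_append, ih hys]
    simp only [List.foldl_cons, List.foldl_nil]
    unfold stepA
    simp only []
    have hn : ¬ (ys ++ [c]) ∈ numbersA := fun hm =>
      h _ (words_in_tableB _ (Or.inl hm)) (List.prefix_refl _)
    have hs : ¬ (ys ++ [c]) ∈ signsA := fun hm =>
      h _ (words_in_tableB _ (Or.inr hm)) (List.prefix_refl _)
    simp [hn, hs]

-- the main equivalence on char lists, by strong induction on the length
theorem main_eq : ∀ n (cs : List Char), cs.length ≤ n →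
    (cs.foldl stepA ([], [])).1 = scanB cs := by
  intro n
  induction n with
  | zero =>
    intro cs hcs
    have : cs = [] := List.length_eq_zero_iff.mp (Nat.le_zero.mp hcs)
    subst this
    rw [scanB.eq_def]
    decide
  | succ n ih =>
    intro cs hcs
    rcases h : tableB.find? (fun p => p.1.isPrefixOf cs) with _ | ⟨w, r⟩ <;>
      rw [scanB.eq_def, h]
    · -- no keyword matches at the front: A emits nothing
      have hnone := List.find?_eq_none.mp h
      have hno : ∀ w ∈ tableB.map Prod.fst, ¬ w <+: cs := by
        intro w hw hpre
        obtain ⟨p, hp, hpw⟩ := List.mem_map.mp hw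
        exact (by simpa using hnone p hp : ¬ p.1 <+: cs) (hpw ▸ hpre)
      rw [noMatch cs hno]
    · -- keyword w matches: cs = w ++ rest, A consumes w then recurses on rest
      have hmem := List.mem_of_find?_eq_some h
      have hpre : w <+: cs := by
        have := List.find?_some h
        simpa [List.isPrefixOf_iff_prefix] using this
      obtain ⟨rest, hrest⟩ := hpre
      subst hrest
      have hwpos : 0 < w.length := tableB_key_pos (w, r) hmem
      rw [List.foldl_append, word_eval _ hmem, foldl_stepA_shift]
      have hlen : rest.length ≤ n := by
        have hl : (w ++ rest).length = w.length + rest.length := by simp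
        omega
      simp [ih rest hlen]

-- ===== VERDICT (by name: the statement is the Claim_ definition above) =====
theorem stringToNum_spec : Claim_equal_stringToNum := by
  intro s _
  unfold Spec_stringToNum stringToNum stringToNum_alt
  rw [main_eq s.toList.length s.toList le_rfl]
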